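-- pv_equiv track=rewrite | github.com/gimboleo/studia_public | semestr 3/mia/tydzien 6/3.py | dfs
-- ===== SOURCE A (Python) =====
-- def dfs(graph, x, y):
--     visited = {x}
--     stack = [x]
--
--     while stack:
--         e = stack.pop()
--         visited.add(e)
--
--         for ch in graph[e]:
--             if ch != y and ch not in visited: stack.append(ch)
--
--     return len(visited)
-- ===== SOURCE B (Python) =====
-- def dfs(graph, x, y):
--     # Level-synchronous BFS: expand whole frontiers at once instead of a DFS stack.
--     visited = {x}
--     frontier = {x}
--     while frontier:
--         nxt = {ch for n in frontier for ch in graph[n]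
--                if ch != y and ch not in visited}
--         visited |= nxt
--         frontier = nxt
--     return len(visited)
-- ===== Notes on version B (the rewrite author's own statement) =====
-- stated objective: alternative
-- what changed: Replaces A's explicit LIFO-stack DFS (pop one node, push its unvisited children, re-pushing duplicates) with a level-synchronous BFS that builds each whole next frontier as a set comprehension and unions it into visited, so no node is ever enqueued twice.
-- outside the precondition, e.g. on dfs({0: [], 1: [5]}, 0, 2): A returns 1, B returns 1
import Mathlib
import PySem

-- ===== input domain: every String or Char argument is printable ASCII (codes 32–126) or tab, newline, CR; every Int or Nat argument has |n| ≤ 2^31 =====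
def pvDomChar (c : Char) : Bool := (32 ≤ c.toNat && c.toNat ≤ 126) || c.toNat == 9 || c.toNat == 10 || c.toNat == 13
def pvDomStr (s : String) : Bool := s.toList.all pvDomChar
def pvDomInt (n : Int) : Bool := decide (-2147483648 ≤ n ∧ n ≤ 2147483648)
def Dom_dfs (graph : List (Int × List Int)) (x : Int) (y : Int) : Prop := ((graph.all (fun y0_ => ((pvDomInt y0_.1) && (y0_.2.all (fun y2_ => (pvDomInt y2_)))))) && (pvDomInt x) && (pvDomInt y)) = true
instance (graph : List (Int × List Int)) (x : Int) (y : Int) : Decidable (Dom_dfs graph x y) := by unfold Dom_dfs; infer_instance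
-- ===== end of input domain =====

-- B replaces A's explicit DFS stack (pop one node, push its unvisited children) by a
-- level-synchronous BFS expanding whole frontier sets at once; same reachable count, similar cost.


-- ===== PORT A =====
-- Python `graph[e]` on the dict; it raises KeyError when e is not a key — Pre_dfs excludes
-- such runs, and the port reads [] there (a case Python never reaches inside Pre_).
def pvAdj (graph : List (Int × List Int)) (e : Int) : List Int :=
  PySem.Dict.getD (PySem.Dict.mk graph) e []

-- termination helper: every adjacency entry comes from the flattened neighbour lists
theorem pvAdj_subset (graph : List (Int × List Int)) (e : Int) :
    ∀ ch ∈ pvAdj graph e, ch ∈ graph.flatMap Prod.snd := by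
  induction graph with
  | nil => intro ch h; simp [pvAdj, PySem.Dict.getD, PySem.Dict.get?] at h
  | cons p rest ih =>
    intro ch h
    rw [pvAdj, PySem.Dict.getD, PySem.Dict.get?_mk_cons] at h
    by_cases hk : p.1 == e
    · simp [hk] at h
      simp [List.mem_flatMap]
      exact Or.inl h
    · simp only [hk, Bool.false_eq_true, if_false] at h
      have := ih ch (by rw [pvAdj, PySem.Dict.getD]; simpa using h)
      simp [List.mem_flatMap] at this ⊢
      rcases this with ⟨a, b, hab, hc⟩
      exact Or.inr ⟨a, b, hab, hc⟩

-- A's loop measure: (unvisited candidate nodes, already-visited entries still on the stack)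
def pvM1 (graph : List (Int × List Int)) (visited stack : List Int) : Nat :=
  ((stack.toFinset ∪ (graph.flatMap Prod.snd).toFinset) \ visited.toFinset).card

def pvM2 (visited stack : List Int) : Nat :=
  (stack.filter (fun a => PySem.Set.contains visited a)).length

theorem pvM1_step_le (graph : List (Int × List Int)) (y e : Int) (visited rest : List Int) :
    pvM1 graph (PySem.Set.add visited e)
      (((pvAdj graph e).filter (fun ch => ch != y && !(PySem.Set.contains (PySem.Set.add visited e) ch))).reverse ++ rest)
      ≤ pvM1 graph visited (e :: rest) := by
  apply Finset.card_le_card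
  intro a ha
  simp only [Finset.mem_sdiff, Finset.mem_union, List.mem_toFinset, List.mem_append,
    List.mem_reverse, List.mem_filter, List.mem_cons] at ha ⊢
  rcases ha with ⟨hin, hnv⟩
  constructor
  · rcases hin with (⟨hch, _⟩ | hr) | hN
    · exact Or.inr (pvAdj_subset graph e a hch)
    · exact Or.inl (Or.inr hr)
    · exact Or.inr hN
  · intro hv; exact hnv (by simp [PySem.Set.mem_add, hv])

theorem pvM1_step_lt (graph : List (Int × List Int)) (y e : Int) (visited rest : List Int)
    (he : e ∉ visited) :
    pvM1 graph (PySem.Set.add visited e)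
      (((pvAdj graph e).filter (fun ch => ch != y && !(PySem.Set.contains (PySem.Set.add visited e) ch))).reverse ++ rest)
      < pvM1 graph visited (e :: rest) := by
  apply Finset.card_lt_card
  constructor
  · intro a ha
    simp only [Finset.mem_sdiff, Finset.mem_union, List.mem_toFinset, List.mem_append,
      List.mem_reverse, List.mem_filter, List.mem_cons] at ha ⊢
    rcases ha with ⟨hin, hnv⟩
    constructor
    · rcases hin with (⟨hch, _⟩ | hr) | hN
      · exact Or.inr (pvAdj_subset graph e a hch)
      · exact Or.inl (Or.inr hr)
      · exact Or.inr hN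
    · intro hv; exact hnv (by simp [PySem.Set.mem_add, hv])
  · intro hsub
    have : e ∈ ((e :: rest).toFinset ∪ (graph.flatMap Prod.snd).toFinset) \ visited.toFinset := by
      simp [he]
    have h2 := hsub this
    simp [PySem.Set.mem_add] at h2

theorem pvM2_step_lt (graph : List (Int × List Int)) (y e : Int) (visited rest : List Int)
    (he : e ∈ visited) :
    pvM2 (PySem.Set.add visited e)
      (((pvAdj graph e).filter (fun ch => ch != y && !(PySem.Set.contains (PySem.Set.add visited e) ch))).reverse ++ rest)
      < pvM2 visited (e :: rest) := by
  have hadd : PySem.Set.add visited e = visited := PySem.Set.add_of_mem he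
  rw [hadd]
  simp only [pvM2, List.filter_append, List.length_append]
  have hnil : (((pvAdj graph e).filter (fun ch => ch != y && !(PySem.Set.contains visited ch))).reverse.filter
      (fun a => PySem.Set.contains visited a)) = [] := by
    rw [List.filter_eq_nil_iff]
    intro a ha
    simp only [List.mem_reverse, List.mem_filter, Bool.and_eq_true, Bool.not_eq_true'] at ha
    intro hcon
    rw [ha.2.2] at hcon
    exact Bool.false_ne_true hcon
  rw [hnil]
  simp [he]

-- `while stack:` — the head is Python's stack top (Python appends the filtered children
-- left-to-right at the end, so here they go on reversed in front of the remaining stack)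
def dfsLoop (graph : List (Int × List Int)) (y : Int)
    (visited : PySem.Set Int) (stack : List Int) : PySem.Set Int :=
  match stack with
  | [] => visited
  | e :: rest =>
      let visited' := PySem.Set.add visited e
      let pushes := (pvAdj graph e).filter
        (fun ch => ch != y && !(PySem.Set.contains visited' ch))
      dfsLoop graph y visited' (pushes.reverse ++ rest)
  termination_by (pvM1 graph visited stack, pvM2 visited stack)
  decreasing_by
    by_cases he : e ∈ visited
    · rcases lt_or_eq_of_le (pvM1_step_le graph y e visited rest) with h | h
      · exact Prod.Lex.left _ _ h
      · rw [h]
        exact Prod.Lex.right _ (pvM2_step_lt graph y e visited rest he)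
    · exact Prod.Lex.left _ _ (pvM1_step_lt graph y e visited rest he)

def dfs (graph : List (Int × List Int)) (x : Int) (y : Int) : Int :=
  PySem.Set.len (dfsLoop graph y (PySem.Set.ofList [x]) [x])

-- ===== PORT B =====
-- one frontier expansion: the set comprehension over the current frontier
def bfsStep (graph : List (Int × List Int)) (y : Int)
    (visited frontier : PySem.Set Int) : PySem.Set Int :=
  frontier.foldl
    (fun acc n =>
      (pvAdj graph n).foldl
        (fun acc ch =>
          if ch != y && !(PySem.Set.contains visited ch) then PySem.Set.add acc ch else acc)
        acc)
    PySem.Set.empty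

-- membership spec of the comprehension (also needed by bfsLoop's termination proof)
theorem mem_foldl_addIf (y : Int) (visited : PySem.Set Int) (l : List Int) :
    ∀ (acc : PySem.Set Int) (c : Int),
      c ∈ l.foldl (fun acc ch =>
          if ch != y && !(PySem.Set.contains visited ch) then PySem.Set.add acc ch else acc) acc
        ↔ c ∈ acc ∨ (c ∈ l ∧ c ≠ y ∧ c ∉ visited) := by
  induction l with
  | nil => simp
  | cons a l ih =>
    intro acc c
    simp only [List.foldl_cons]
    rw [ih]
    by_cases hc : (a != y && !(PySem.Set.contains visited a)) = true
    · rw [if_pos hc]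
      simp only [Bool.and_eq_true, bne_iff_ne, Bool.not_eq_true',
        PySem.Set.contains_eq_listContains, List.contains_eq_mem, decide_eq_false_iff_not] at hc
      simp only [PySem.Set.mem_add, List.mem_cons]
      constructor
      · rintro ((hc' | rfl) | ⟨hl, hy, hv⟩)
        · exact Or.inl hc'
        · exact Or.inr ⟨Or.inl rfl, hc.1, hc.2⟩
        · exact Or.inr ⟨Or.inr hl, hy, hv⟩
      · rintro (hc' | ⟨(rfl | hl), hy, hv⟩)
        · exact Or.inl (Or.inl hc')
        · exact Or.inl (Or.inr rfl)
        · exact Or.inr ⟨hl, hy, hv⟩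
    · rw [if_neg hc]
      simp only [Bool.and_eq_true, bne_iff_ne, Bool.not_eq_true',
        PySem.Set.contains_eq_listContains, List.contains_eq_mem, decide_eq_false_iff_not,
        not_and] at hc
      simp only [List.mem_cons]
      constructor
      · rintro (hc' | ⟨hl, hy, hv⟩)
        · exact Or.inl hc'
        · exact Or.inr ⟨Or.inr hl, hy, hv⟩
      · rintro (hc' | ⟨(rfl | hl), hy, hv⟩)
        · exact Or.inl hc'
        · exact absurd (hc hy) (by simpa using hv)
        · exact Or.inr ⟨hl, hy, hv⟩

theorem mem_bfsStep (graph : List (Int × List Int)) (y : Int)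
    (visited frontier : PySem.Set Int) (c : Int) :
    c ∈ bfsStep graph y visited frontier
      ↔ ∃ n ∈ frontier, c ∈ pvAdj graph n ∧ c ≠ y ∧ c ∉ visited := by
  have H : ∀ acc : PySem.Set Int,
      c ∈ frontier.foldl
        (fun acc n =>
          (pvAdj graph n).foldl
            (fun acc ch =>
              if ch != y && !(PySem.Set.contains visited ch) then PySem.Set.add acc ch else acc)
            acc) acc
      ↔ c ∈ acc ∨ ∃ n ∈ frontier, c ∈ pvAdj graph n ∧ c ≠ y ∧ c ∉ visited := by
    induction frontier with
    | nil => simp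
    | cons n fr ih =>
      intro acc
      simp only [List.foldl_cons]
      rw [ih, mem_foldl_addIf]
      constructor
      · rintro ((hc' | ⟨hl, hy, hv⟩) | ⟨m, hm, hml, hmy, hmv⟩)
        · exact Or.inl hc'
        · exact Or.inr ⟨n, by simp, hl, hy, hv⟩
        · exact Or.inr ⟨m, by simp [hm], hml, hmy, hmv⟩
      · rintro (hc' | ⟨m, hm, hml, hmy, hmv⟩)
        · exact Or.inl (Or.inl hc')
        · rcases List.mem_cons.mp hm with rfl | hm'
          · exact Or.inl (Or.inr ⟨hml, hmy, hmv⟩)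
          · exact Or.inr ⟨m, hm', hml, hmy, hmv⟩
  simpa [bfsStep, PySem.Set.empty] using H PySem.Set.empty

theorem pvUnion_nil (s : PySem.Set Int) : PySem.Set.union s [] = s := rfl

theorem pvM1_bfs_lt (graph : List (Int × List Int)) (y : Int) (visited frontier : PySem.Set Int)
    (hne : bfsStep graph y visited frontier ≠ []) :
    pvM1 graph (PySem.Set.union visited (bfsStep graph y visited frontier)) []
      < pvM1 graph visited [] := by
  obtain ⟨c, hc⟩ := List.exists_mem_of_ne_nil _ hne
  obtain ⟨n, _, hcn, _, hcv⟩ := (mem_bfsStep graph y visited frontier c).mp hc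
  apply Finset.card_lt_card
  constructor
  · intro a ha
    simp only [Finset.mem_sdiff, Finset.mem_union, List.mem_toFinset] at ha ⊢
    exact ⟨ha.1, fun hv => ha.2 (by simp [PySem.Set.mem_union, hv])⟩
  · intro hsub
    have hcN : c ∈ ((([] : List Int).toFinset ∪ (graph.flatMap Prod.snd).toFinset) \ visited.toFinset) := by
      simp only [Finset.mem_sdiff, Finset.mem_union, List.mem_toFinset]
      exact ⟨Or.inr (pvAdj_subset graph n c hcn), hcv⟩
    have h2 := hsub hcN
    simp only [Finset.mem_sdiff, Finset.mem_union, List.mem_toFinset] at h2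
    exact h2.2 (by simp [PySem.Set.mem_union, hc])

def bfsLoop (graph : List (Int × List Int)) (y : Int)
    (visited frontier : PySem.Set Int) : PySem.Set Int :=
  match frontier with
  | [] => visited
  | _ :: _ =>
      let nxt := bfsStep graph y visited frontier
      bfsLoop graph y (PySem.Set.union visited nxt) nxt
  termination_by (pvM1 graph visited [], frontier.length)
  decreasing_by
    by_cases hn : bfsStep graph y visited frontier = []
    · rw [hn, pvUnion_nil]
      exact Prod.Lex.right _ (by simp)
    · exact Prod.Lex.left _ _ (pvM1_bfs_lt graph y visited frontier hn)

def dfs_alt (graph : List (Int × List Int)) (x : Int) (y : Int) : Int :=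
  PySem.Set.len (bfsLoop graph y (PySem.Set.ofList [x]) (PySem.Set.ofList [x]))

-- ===== PRECONDITION & SPEC =====
-- Pre_dfs: x is a key and every listed neighbour other than y is a key, so no graph[·]
-- lookup can raise KeyError (in A or in B). Slightly stronger than necessary: it also
-- excludes graphs whose only missing neighbours are unreachable from x, on which A returns.
def Pre_dfs (graph : List (Int × List Int)) (x : Int) (y : Int) : Prop :=
  x ∈ graph.map Prod.fst ∧ ∀ p ∈ graph, ∀ ch ∈ p.2, ch = y ∨ ch ∈ graph.map Prod.fst
instance (graph : List (Int × List Int)) (x : Int) (y : Int) : Decidable (Pre_dfs graph x y) := by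
  unfold Pre_dfs; infer_instance

def pvWitness_dfs : (List (Int × List Int)) × Int × Int := ([(0, [1, 2]), (1, [2]), (2, [0])], 0, 1)

def Spec_dfs (graph : List (Int × List Int)) (x : Int) (y : Int) (out : Int) : Prop := out = dfs_alt graph x y
instance (graph : List (Int × List Int)) (x : Int) (y : Int) (out : Int) : Decidable (Spec_dfs graph x y out) := by unfold Spec_dfs; infer_instance

-- ===== CLAIM (what is proved, stated in full; the proofs are below) =====
def Claim_equal_dfs : Prop := ∀ (graph : List (Int × List Int)) (x : Int) (y : Int), Dom_dfs graph x y → Pre_dfs graph x y → Spec_dfs graph x y (dfs graph x y)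

-- ===== LEMMAS AND PROOFS =====

-- the reachable-avoiding-y set both programs enumerate
inductive pvReach (graph : List (Int × List Int)) (x y : Int) : Int → Prop
  | base : pvReach graph x y x
  | step {v ch : Int} : pvReach graph x y v → ch ∈ pvAdj graph v → ch ≠ y → pvReach graph x y ch

-- ---- A-side loop facts ----
theorem dfsLoop_grows (graph : List (Int × List Int)) (y : Int) :
    ∀ (visited : PySem.Set Int) (stack : List Int) (v : Int),
      v ∈ visited ∨ v ∈ stack → v ∈ dfsLoop graph y visited stack := by
  intro visited stack
  induction visited, stack using dfsLoop.induct graph y with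
  | case1 visited =>
    intro v hv
    rw [dfsLoop]
    rcases hv with h | h
    · exact h
    · simp at h
  | case2 visited e rest v' ps ih =>
    intro v hv
    rw [dfsLoop]
    apply ih
    rcases hv with h | h
    · exact Or.inl ((PySem.Set.mem_add _ _ _).mpr (Or.inl h))
    · rcases List.mem_cons.mp h with rfl | h'
      · exact Or.inl ((PySem.Set.mem_add _ _ _).mpr (Or.inr rfl))
      · exact Or.inr (by simp [h'])

theorem dfsLoop_sound (graph : List (Int × List Int)) (y : Int) (R : Int → Prop)
    (hR : ∀ v ch, R v → ch ∈ pvAdj graph v → ch ≠ y → R ch) :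
    ∀ (visited : PySem.Set Int) (stack : List Int),
      (∀ v ∈ visited, R v) → (∀ v ∈ stack, R v) →
      ∀ v ∈ dfsLoop graph y visited stack, R v := by
  intro visited stack
  induction visited, stack using dfsLoop.induct graph y with
  | case1 visited =>
    intro h1 _ v hv
    rw [dfsLoop] at hv
    exact h1 v hv
  | case2 visited e rest v' ps ih =>
    intro h1 h2 v hv
    rw [dfsLoop] at hv
    refine ih ?_ ?_ v hv
    · intro w hw
      rcases (PySem.Set.mem_add _ _ _).mp hw with h | rfl
      · exact h1 w h
      · exact h2 w (by simp)
    · intro w hw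
      rcases List.mem_append.mp hw with h | h
      · have := List.mem_filter.mp (List.mem_reverse.mp h)
        have hwy : w ≠ y := by
          have := this.2
          simp only [Bool.and_eq_true, bne_iff_ne] at this
          exact this.1
        exact hR e w (h2 e (by simp)) this.1 hwy
      · exact h2 w (by simp [h])

theorem dfsLoop_closed (graph : List (Int × List Int)) (y : Int) :
    ∀ (visited : PySem.Set Int) (stack : List Int),
      (∀ v, v ∈ visited → v ∉ stack → ∀ ch ∈ pvAdj graph v, ch ≠ y → ch ∈ visited ∨ ch ∈ stack) →
      ∀ v ∈ dfsLoop graph y visited stack, ∀ ch ∈ pvAdj graph v, ch ≠ y →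
        ch ∈ dfsLoop graph y visited stack := by
  intro visited stack
  induction visited, stack using dfsLoop.induct graph y with
  | case1 visited =>
    intro hInv v hv ch hch hchy
    rw [dfsLoop] at hv ⊢
    rcases hInv v hv (by simp) ch hch hchy with h | h
    · exact h
    · simp at h
  | case2 visited e rest v' ps ih =>
    intro hInv
    rw [dfsLoop]
    apply ih
    -- invariant preservation
    intro v hv hvs ch hch hchy
    rcases (PySem.Set.mem_add _ _ _).mp hv with hvv | rfl
    · by_cases hve : v = e
      · subst hve
        by_cases hchv : ch ∈ PySem.Set.add visited v
        · exact Or.inl hchv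
        · refine Or.inr (List.mem_append.mpr (Or.inl ?_))
          rw [List.mem_reverse, List.mem_filter]
          refine ⟨hch, ?_⟩
          simp only [Bool.and_eq_true, bne_iff_ne, Bool.not_eq_true',
            PySem.Set.contains_eq_listContains, List.contains_eq_mem, decide_eq_false_iff_not]
          exact ⟨hchy, hchv⟩
      · have hvrest : v ∉ rest := fun h => hvs (List.mem_append.mpr (Or.inr h))
        rcases hInv v hvv (by simp [hve, hvrest]) ch hch hchy with h | h
        · exact Or.inl ((PySem.Set.mem_add _ _ _).mpr (Or.inl h))
        · rcases List.mem_cons.mp h with rfl | h'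
          · exact Or.inl ((PySem.Set.mem_add _ _ _).mpr (Or.inr rfl))
          · exact Or.inr (List.mem_append.mpr (Or.inr h'))
    · -- v = e
      by_cases hchv : ch ∈ PySem.Set.add visited v
      · exact Or.inl hchv
      · refine Or.inr (List.mem_append.mpr (Or.inl ?_))
        rw [List.mem_reverse, List.mem_filter]
        refine ⟨hch, ?_⟩
        simp only [Bool.and_eq_true, bne_iff_ne, Bool.not_eq_true',
          PySem.Set.contains_eq_listContains, List.contains_eq_mem, decide_eq_false_iff_not]
        exact ⟨hchy, hchv⟩

theorem dfsLoop_nodup (graph : List (Int × List Int)) (y : Int) :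
    ∀ (visited : PySem.Set Int) (stack : List Int),
      visited.Nodup → (dfsLoop graph y visited stack).Nodup := by
  intro visited stack
  induction visited, stack using dfsLoop.induct graph y with
  | case1 visited => intro h; rw [dfsLoop]; exact h
  | case2 visited e rest v' ps ih =>
    intro h
    rw [dfsLoop]
    exact ih (PySem.Set.nodup_add _ _ h)

theorem dfs_mem_iff (graph : List (Int × List Int)) (x y v : Int) :
    v ∈ dfsLoop graph y (PySem.Set.ofList [x]) [x] ↔ pvReach graph x y v := by
  have hof : PySem.Set.ofList [x] = [x] := rfl
  constructor
  · apply dfsLoop_sound graph y (pvReach graph x y)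
      (fun v ch hv hch hy => pvReach.step hv hch hy)
    · intro w hw
      rw [hof] at hw
      rcases List.mem_singleton.mp hw with rfl
      exact pvReach.base
    · intro w hw
      rcases List.mem_singleton.mp hw with rfl
      exact pvReach.base
  · intro h
    induction h with
    | base => exact dfsLoop_grows graph y _ _ x (Or.inr (by simp))
    | step hv hch hy ih =>
      refine dfsLoop_closed graph y _ _ ?_ _ ih _ hch hy
      intro w hw hws
      rw [hof] at hw
      exact absurd hw hws

-- ---- B-side loop facts ----
theorem bfsLoop_grows (graph : List (Int × List Int)) (y : Int) :
    ∀ (visited frontier : PySem.Set Int) (v : Int),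
      v ∈ visited → v ∈ bfsLoop graph y visited frontier := by
  intro visited frontier
  induction visited, frontier using bfsLoop.induct graph y with
  | case1 visited => intro v hv; rw [bfsLoop]; exact hv
  | case2 visited head tail nx ih =>
    intro v hv
    rw [bfsLoop]
    exact ih v ((PySem.Set.mem_union _ _ _).mpr (Or.inl hv))

theorem bfsLoop_sound (graph : List (Int × List Int)) (y : Int) (R : Int → Prop)
    (hR : ∀ v ch, R v → ch ∈ pvAdj graph v → ch ≠ y → R ch) :
    ∀ (visited frontier : PySem.Set Int),
      (∀ v ∈ visited, R v) → (∀ v ∈ frontier, v ∈ visited) →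
      ∀ v ∈ bfsLoop graph y visited frontier, R v := by
  intro visited frontier
  induction visited, frontier using bfsLoop.induct graph y with
  | case1 visited => intro h1 _ v hv; rw [bfsLoop] at hv; exact h1 v hv
  | case2 visited head tail nx ih =>
    intro h1 h2 v hv
    rw [bfsLoop] at hv
    refine ih ?_ ?_ v hv
    · intro w hw
      rcases (PySem.Set.mem_union _ _ _).mp hw with h | h
      · exact h1 w h
      · obtain ⟨n, hn, hwn, hwy, _⟩ := (mem_bfsStep graph y visited (head :: tail) w).mp h
        exact hR n w (h1 n (h2 n hn)) hwn hwy
    · intro w hw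
      exact (PySem.Set.mem_union _ _ _).mpr (Or.inr hw)

theorem bfsLoop_closed (graph : List (Int × List Int)) (y : Int) :
    ∀ (visited frontier : PySem.Set Int),
      (∀ v, v ∈ visited → v ∉ frontier → ∀ ch ∈ pvAdj graph v, ch ≠ y → ch ∈ visited) →
      (∀ v ∈ frontier, v ∈ visited) →
      ∀ v ∈ bfsLoop graph y visited frontier, ∀ ch ∈ pvAdj graph v, ch ≠ y →
        ch ∈ bfsLoop graph y visited frontier := by
  intro visited frontier
  induction visited, frontier using bfsLoop.induct graph y with
  | case1 visited =>
    intro hInv _ v hv ch hch hchy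
    rw [bfsLoop] at hv ⊢
    exact hInv v hv (by simp) ch hch hchy
  | case2 visited head tail nx ih =>
    intro hInv hfv
    rw [bfsLoop]
    apply ih
    · -- invariant preservation
      intro v hv hvn ch hch hchy
      rcases (PySem.Set.mem_union _ _ _).mp hv with hvv | hvnxt
      · by_cases hvf : v ∈ (head :: tail)
        · by_cases hchv : ch ∈ visited
          · exact (PySem.Set.mem_union _ _ _).mpr (Or.inl hchv)
          · have : ch ∈ bfsStep graph y visited (head :: tail) :=
              (mem_bfsStep graph y visited (head :: tail) ch).mpr ⟨v, hvf, hch, hchy, hchv⟩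
            exact (PySem.Set.mem_union _ _ _).mpr (Or.inr this)
        · have := hInv v hvv hvf ch hch hchy
          exact (PySem.Set.mem_union _ _ _).mpr (Or.inl this)
      · exact absurd hvnxt hvn
    · intro w hw
      exact (PySem.Set.mem_union _ _ _).mpr (Or.inr hw)

theorem bfsLoop_nodup (graph : List (Int × List Int)) (y : Int) :
    ∀ (visited frontier : PySem.Set Int),
      visited.Nodup → (bfsLoop graph y visited frontier).Nodup := by
  intro visited frontier
  induction visited, frontier using bfsLoop.induct graph y with
  | case1 visited => intro h; rw [bfsLoop]; exact h
  | case2 visited head tail nx ih =>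
    intro h
    rw [bfsLoop]
    exact ih (PySem.Set.nodup_union _ _ h)

theorem alt_mem_iff (graph : List (Int × List Int)) (x y v : Int) :
    v ∈ bfsLoop graph y (PySem.Set.ofList [x]) (PySem.Set.ofList [x]) ↔ pvReach graph x y v := by
  have hof : PySem.Set.ofList [x] = [x] := rfl
  constructor
  · apply bfsLoop_sound graph y (pvReach graph x y)
      (fun v ch hv hch hy => pvReach.step hv hch hy)
    · intro w hw
      rw [hof] at hw
      rcases List.mem_singleton.mp hw with rfl
      exact pvReach.base
    · intro w hw; exact hw
  · intro h
    induction h with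
    | base => exact bfsLoop_grows graph y _ _ x (by simp [hof])
    | step hv hch hy ih =>
      refine bfsLoop_closed graph y _ _ ?_ (fun w hw => hw) _ ih _ hch hy
      intro w hw hws
      rw [hof] at hw
      exact absurd hw hws

-- ===== VERDICT (by name: the statement is the Claim_ definition above) =====
theorem dfs_spec : Claim_equal_dfs := by
  unfold Claim_equal_dfs
  intro graph x y _ _
  unfold Spec_dfs dfs dfs_alt
  have nodA : (dfsLoop graph y (PySem.Set.ofList [x]) [x]).Nodup :=
    dfsLoop_nodup graph y _ _ (PySem.Set.nodup_ofList [x])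
  have nodB : (bfsLoop graph y (PySem.Set.ofList [x]) (PySem.Set.ofList [x])).Nodup :=
    bfsLoop_nodup graph y _ _ (PySem.Set.nodup_ofList [x])
  have hperm : (dfsLoop graph y (PySem.Set.ofList [x]) [x]).Perm
      (bfsLoop graph y (PySem.Set.ofList [x]) (PySem.Set.ofList [x])) :=
    (List.perm_ext_iff_of_nodup nodA nodB).mpr
      (fun a => (dfs_mem_iff graph x y a).trans (alt_mem_iff graph x y a).symm)
  simp [PySem.Set.len, hperm.length_eq]
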